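-- pv_equiv track=rewrite | github.com/ThirdAILabs/Universe | thirdai_python_package_tests/neural_db/test_constrained_search_speed.py | generate_item_metadata
-- ===== SOURCE A (Python) =====
-- from typing import List
--
-- def generate_item_metadata(
--     metadata_fields: List[str],
--     metadata_options: List[str],
--     num_items: int,
-- ):
--     """Generates `num_items` unique metadata dictionaries containing all the
--     fields listed in `metadata_fields`, where each field has one of the values
--     listed in `metadata_options`.
--
--     For example, if `metadata_fields` is ["a", "b", "c"] and `metadata_options`
--     is ["d", "e", "f"], then this function may generate
--     {"a": "d", "b": "d", "f": "d"}.
--     {"a": "d", "b": "d", "f": "e"},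
--     {"a": "e", "b": "d", "f": "d"},
--     and so on.
--     """
--     metadata = [{} for _ in range(num_items)]
--     for i in range(num_items):
--         to_be_modded = i
--         for field in metadata_fields:
--             metadata[i][field] = metadata_options[to_be_modded % len(metadata_options)]
--             to_be_modded //= len(metadata_options)
--     return metadata
-- ===== SOURCE B (Python) =====
-- def generate_item_metadata(
--     metadata_fields,
--     metadata_options,
--     num_items,
-- ):
--     # Column-wise construction: build one value-column per field by tiling a
--     # repetition pattern (each option repeated block times), then assemble rows.
--     # Runs are capped at count, and only the options that can appear within the
--     # first count rows are materialised, so each column costs O(count).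
--     count = max(num_items, 0)
--     if count == 0:
--         return []
--     if not metadata_fields:
--         return [{} for _ in range(count)]
--     columns = []
--     block = 1
--     for _ in metadata_fields:
--         reps = min(block, count)
--         span = min(len(metadata_options), count // block + 1)
--         pattern = [opt for opt in metadata_options[:span] for _ in range(reps)]
--         columns.append((pattern * (count // len(pattern) + 1))[:count])
--         block *= len(metadata_options)
--     return [
--         dict(zip(metadata_fields, [column[i] for column in columns]))
--         for i in range(count)
--     ]
-- ===== Notes on version B (the rewrite author's own statement) =====
-- stated objective: alternative
-- what changed: Replaces A's row-major loop with a per-item threaded quotient accumulator (successive mod/floor-div per field) by a column-major construction: for each field it builds the whole value column at once by tiling a repetition pattern (each option repeated block times, with the run length and the number of materialised options capped by count) and then assembles the dicts by zipping the columns, so no per-item division or modulo is performed.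
import Mathlib
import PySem

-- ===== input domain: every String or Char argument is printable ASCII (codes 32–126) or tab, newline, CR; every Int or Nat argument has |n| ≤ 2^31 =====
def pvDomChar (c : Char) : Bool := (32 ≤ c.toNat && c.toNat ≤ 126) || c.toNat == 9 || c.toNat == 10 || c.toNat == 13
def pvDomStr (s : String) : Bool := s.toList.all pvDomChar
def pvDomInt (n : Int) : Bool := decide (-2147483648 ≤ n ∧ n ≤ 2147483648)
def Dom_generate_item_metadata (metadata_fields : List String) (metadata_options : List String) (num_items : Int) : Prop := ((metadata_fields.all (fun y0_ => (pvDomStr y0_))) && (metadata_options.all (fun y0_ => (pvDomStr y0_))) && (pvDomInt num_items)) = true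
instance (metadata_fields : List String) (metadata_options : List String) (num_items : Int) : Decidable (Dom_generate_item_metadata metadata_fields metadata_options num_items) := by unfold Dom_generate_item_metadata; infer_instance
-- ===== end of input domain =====

-- B replaces A's row-major loop with a per-item threaded quotient accumulator by a
-- column-major construction (one tiled repetition-pattern column per field, then rows
-- assembled by zipping); objective: alternative, same asymptotic cost.

-- ===== PORT A =====
-- inner loop of A: for field in metadata_fields: d[field] = opts[t % n]; t //= n
def pvAInner (metadata_options : List String) (metadata_fields : List String)
    (st : PySem.Dict String String × Int) : PySem.Dict String String × Int :=
  metadata_fields.foldl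
    (fun st field =>
      (st.1.insert field
        (PySem.List.pyGetD metadata_options
          (PySem.Int.mod st.2 (PySem.List.len metadata_options)) ""),
       PySem.Int.floordiv st.2 (PySem.List.len metadata_options)))
    st

def generate_item_metadata (metadata_fields : List String) (metadata_options : List String) (num_items : Int) : List (List (String × String)) :=
  -- metadata = [{} for _ in range(num_items)]
  let metadata : List (PySem.Dict String String) :=
    (PySem.List.pyRange 0 num_items 1).map (fun _ => PySem.Dict.empty)
  -- for i in range(num_items): (inner loop mutates metadata[i])
  let metadata :=
    (PySem.List.pyRange 0 num_items 1).foldl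
      (fun m i =>
        PySem.List.pySetD m i
          (pvAInner metadata_options metadata_fields
            (PySem.List.pyGetD m i PySem.Dict.empty, i)).1)
      metadata
  metadata.map (fun d => d.items)

-- ===== PORT B =====
-- pattern = [opt for opt in metadata_options for _ in range(min(block, count))]
def pvRepeatEach (metadata_options : List String) (blockLen : Int) : List String :=
  metadata_options.flatMap (fun opt => (PySem.List.pyRange 0 blockLen 1).map (fun _ => opt))

-- (pattern * (count // len(pattern) + 1))[:count]
def pvMkCol (pattern : List String) (count : Int) : List String :=
  PySem.List.slice
    (PySem.List.pyRepeat pattern (PySem.Int.floordiv count (PySem.List.len pattern) + 1))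
    none (some count)

def generate_item_metadata_alt (metadata_fields : List String) (metadata_options : List String) (num_items : Int) : List (List (String × String)) :=
  let count := max num_items 0
  if count = 0 then []
  else if metadata_fields = [] then
    (PySem.List.pyRange 0 count 1).map (fun _ => (PySem.Dict.empty : PySem.Dict String String).items)
  else
    -- the column loop: reps = min(block, count); span = min(len(options), count // block + 1);
    -- pattern = repeat-each(options[:span], reps); columns.append(tile(pattern)); block *= len(options)
    let st := metadata_fields.foldl
      (fun (st : List (List String) × Int) _ =>
        (st.1 ++ [pvMkCol
            (pvRepeatEach
              (PySem.List.slice metadata_options none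
                (some (min (PySem.List.len metadata_options) (PySem.Int.floordiv count st.2 + 1))))
              (min st.2 count)) count],
         st.2 * PySem.List.len metadata_options))
      ([], 1)
    -- [dict(zip(fields, [column[i] for column in columns])) for i in range(count)]
    (PySem.List.pyRange 0 count 1).map (fun i =>
      ((List.zip metadata_fields (st.1.map (fun column => PySem.List.pyGetD column i ""))).foldl
        (fun (d : PySem.Dict String String) kv => d.insert kv.1 kv.2) PySem.Dict.empty).items)

-- ===== PRECONDITION & SPEC =====
-- Pre_ excludes exactly the inputs where A (and B alike) raises ZeroDivisionError:
-- empty metadata_options together with a nonempty field list and at least one item.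
def Pre_generate_item_metadata (metadata_fields : List String) (metadata_options : List String) (num_items : Int) : Prop :=
  metadata_options ≠ [] ∨ metadata_fields = [] ∨ num_items ≤ 0
instance (metadata_fields : List String) (metadata_options : List String) (num_items : Int) : Decidable (Pre_generate_item_metadata metadata_fields metadata_options num_items) := by unfold Pre_generate_item_metadata; infer_instance

def pvWitness_generate_item_metadata : List String × List String × Int := (["a", "b"], ["x", "y"], 5)

def Spec_generate_item_metadata (metadata_fields : List String) (metadata_options : List String) (num_items : Int) (out : List (List (String × String))) : Prop := out = generate_item_metadata_alt metadata_fields metadata_options num_items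
instance (metadata_fields : List String) (metadata_options : List String) (num_items : Int) (out : List (List (String × String))) : Decidable (Spec_generate_item_metadata metadata_fields metadata_options num_items out) := by unfold Spec_generate_item_metadata; infer_instance

-- ===== CLAIM (what is proved, stated in full; the proofs are below) =====
def Claim_equal_generate_item_metadata : Prop := ∀ (metadata_fields : List String) (metadata_options : List String) (num_items : Int), Dom_generate_item_metadata metadata_fields metadata_options num_items → Pre_generate_item_metadata metadata_fields metadata_options num_items → Spec_generate_item_metadata metadata_fields metadata_options num_items (generate_item_metadata metadata_fields metadata_options num_items)

-- ===== LEMMAS AND PROOFS =====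

-- proof-side normal form of one row: insert, per field j, opts[(i // n^j) % n]
def pvDigits (metadata_options : List String) (n i : Int) :
    Nat → List String → PySem.Dict String String → PySem.Dict String String
  | _, [], d => d
  | j, field :: rest, d =>
      pvDigits metadata_options n i (j + 1) rest
        (d.insert field
          (PySem.List.pyGetD metadata_options
            (PySem.Int.mod (PySem.Int.floordiv i (n ^ j)) n) ""))

-- successive floor-division by n is floor-division by n^(j+1) (nonneg dividend, positive n)
theorem pv_fdiv_fdiv (i n : Int) (j : Nat) (_hi : 0 ≤ i) (hn : 0 < n) :
    PySem.Int.floordiv (PySem.Int.floordiv i (n ^ j)) n = PySem.Int.floordiv i (n ^ (j + 1)) := by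
  have hpj : (0:Int) < n ^ j := pow_pos hn j
  rw [PySem.Int.floordiv_eq_ediv_of_pos hpj, PySem.Int.floordiv_eq_ediv_of_pos hn,
      PySem.Int.floordiv_eq_ediv_of_pos (pow_pos hn (j+1)),
      Int.ediv_ediv_of_nonneg (le_of_lt hpj), pow_succ]

-- A's threaded inner loop computes the positional digits
theorem pv_inner_eq (metadata_options : List String) (metadata_fields : List String)
    (i : Int) (hi : 0 ≤ i) (hn : 0 < PySem.List.len metadata_options) :
    ∀ (j : Nat) (d : PySem.Dict String String),
      (pvAInner metadata_options metadata_fields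
        (d, PySem.Int.floordiv i ((PySem.List.len metadata_options) ^ j))).1
      = pvDigits metadata_options (PySem.List.len metadata_options) i j metadata_fields d := by
  induction metadata_fields with
  | nil => intro j d; rfl
  | cons f rest ih =>
      intro j d
      show (pvAInner metadata_options rest
          (d.insert f
            (PySem.List.pyGetD metadata_options
              (PySem.Int.mod (PySem.Int.floordiv i ((PySem.List.len metadata_options) ^ j))
                (PySem.List.len metadata_options)) ""),
           PySem.Int.floordiv (PySem.Int.floordiv i ((PySem.List.len metadata_options) ^ j))
             (PySem.List.len metadata_options))).1
        = pvDigits metadata_options (PySem.List.len metadata_options) i j (f :: rest) d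
      rw [pv_fdiv_fdiv i _ j hi hn]
      exact ih (j + 1) _

-- the preallocate-then-assign outer loop of A is a map over the index range
theorem pv_outer (f : Int → PySem.Dict String String)
    (g : PySem.Dict String String → Int → PySem.Dict String String)
    (hfg : ∀ i, 0 ≤ i → g PySem.Dict.empty i = f i) :
    ∀ (k : Nat) (tail : List (PySem.Dict String String)),
      (PySem.List.pyRange 0 (k : Int) 1).foldl
        (fun m i => PySem.List.pySetD m i (g (PySem.List.pyGetD m i PySem.Dict.empty) i))
        ((PySem.List.pyRange 0 (k : Int) 1).map (fun _ => PySem.Dict.empty) ++ tail)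
      = (PySem.List.pyRange 0 (k : Int) 1).map f ++ tail := by
  intro k
  induction k with
  | zero => intro tail; simp [PySem.List.pyRange_one_eq_nil]
  | succ k ih =>
      intro tail
      have hcast : ((k + 1 : Nat) : Int) = (k : Int) + 1 := by push_cast; ring
      rw [hcast, PySem.List.pyRange_one_succ_right (by positivity)]
      have hlen : ((PySem.List.pyRange 0 (k : Int) 1).map f).length = k := by
        simp [PySem.List.length_pyRange_one]
      rw [List.map_append, List.map_append, List.foldl_append]
      simp only [List.map_cons, List.map_nil, List.append_assoc, List.singleton_append]
      rw [ih (PySem.Dict.empty :: tail)]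
      simp only [List.foldl_cons, List.foldl_nil]
      rw [PySem.List.pyGetD_natCast, PySem.List.pySetD_natCast]
      rw [List.getD_eq_getElem?_getD, List.getElem?_append_right (by omega)]
      simp [hlen, hfg (k : Int) (by positivity)]

-- A's inner loop started on an empty dict at index i is the digit normal form
theorem pv_hfg (metadata_fields metadata_options : List String)
    (hn : 0 < PySem.List.len metadata_options) (i : Int) (hi : 0 ≤ i) :
    (pvAInner metadata_options metadata_fields (PySem.Dict.empty, i)).1
      = pvDigits metadata_options (PySem.List.len metadata_options) i 0 metadata_fields
          PySem.Dict.empty := by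
  have h1 : PySem.Int.floordiv i ((PySem.List.len metadata_options) ^ 0) = i := by
    rw [pow_zero, PySem.Int.floordiv_eq_ediv_of_pos (by omega : (0:Int) < 1), Int.ediv_one]
  have := pv_inner_eq metadata_options metadata_fields i hi hn 0 PySem.Dict.empty
  rwa [h1] at this

-- elements of a flat-mapped replication: block m holds xs[m / c]
theorem pv_flatMap_replicate_getD (xs : List String) (c : Nat) :
    ∀ m, m < xs.length * c →
      (xs.flatMap (fun o => List.replicate c o)).getD m "" = xs.getD (m / c) "" := by
  induction xs with
  | nil => intro m hm; simp at hm
  | cons x rest ih =>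
      intro m hm
      have hc : 0 < c := by
        rcases Nat.eq_zero_or_pos c with h | h
        · subst h; simp at hm
        · exact h
      simp only [List.flatMap_cons]
      by_cases hmc : m < c
      · rw [List.getD_eq_getElem?_getD, List.getElem?_append_left (by simp [hmc]),
            List.getElem?_replicate]
        simp [hmc, Nat.div_eq_of_lt hmc]
      · obtain ⟨m', rfl⟩ : ∃ m', m = m' + c := ⟨m - c, by omega⟩
        rw [List.getD_eq_getElem?_getD, List.getElem?_append_right (by simp),
            List.length_replicate, Nat.add_sub_cancel, ← List.getD_eq_getElem?_getD,
            Nat.add_div_right _ hc]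
        have hm' : m' < rest.length * c := by
          have := hm; simp only [List.length_cons] at this; nlinarith
        rw [ih m' hm']
        rfl

-- length of a flat-mapped replication
theorem pv_flatMap_replicate_length (xs : List String) (c : Nat) :
    (xs.flatMap (fun o => List.replicate c o)).length = xs.length * c := by
  induction xs with
  | nil => simp
  | cons x rest ih => simp [ih]; ring

-- pvRepeatEach at a Nat-cast block length IS a flat-mapped replication
theorem pv_repeatEach_eq (xs : List String) (c : Nat) :
    pvRepeatEach xs (c : Int) = xs.flatMap (fun o => List.replicate c o) := by
  unfold pvRepeatEach
  congr 1; funext o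
  exact List.eq_replicate_iff.mpr
    ⟨by simp [PySem.List.length_pyRange_one], by simp⟩

-- tiling: element i of flatten (replicate K p) is p[i % len p]
theorem pv_tile_getD (p : List String) (hp : p ≠ []) :
    ∀ (K : Nat) m, m < K * p.length →
      ((List.replicate K p).flatten).getD m "" = p.getD (m % p.length) "" := by
  have hl : 0 < p.length := List.length_pos_of_ne_nil hp
  intro K
  induction K with
  | zero => intro m hm; omega
  | succ K ih =>
      intro m hm
      simp only [List.replicate_succ, List.flatten_cons]
      by_cases hmp : m < p.length
      · rw [List.getD_eq_getElem?_getD, List.getElem?_append_left hmp,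
            ← List.getD_eq_getElem?_getD, Nat.mod_eq_of_lt hmp]
      · obtain ⟨m', rfl⟩ : ∃ m', m = m' + p.length := ⟨m - p.length, by omega⟩
        rw [List.getD_eq_getElem?_getD, List.getElem?_append_right (by omega),
            Nat.add_sub_cancel, ← List.getD_eq_getElem?_getD,
            Nat.add_mod_right, ih m' (by nlinarith)]

-- element i of a built column: pvMkCol p count at 0 ≤ i < count is p[i % len p]
theorem pv_mkCol_getD (p : List String) (hp : p ≠ []) (count : Int) (i : Int)
    (hi : 0 ≤ i) (hic : i < count) :
    PySem.List.pyGetD (pvMkCol p count) i "" = p.getD (i.toNat % p.length) "" := by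
  have hl : 0 < p.length := List.length_pos_of_ne_nil hp
  have hcount : 0 ≤ count := by omega
  unfold pvMkCol
  rw [PySem.List.slice_to _ hcount]
  have hK : PySem.Int.floordiv count (PySem.List.len p) + 1
      = ((count.toNat / p.length + 1 : Nat) : Int) := by
    rw [PySem.List.len_eq, show count = ((count.toNat : Nat) : Int) by omega]
    rw [PySem.Int.floordiv_natCast]
    push_cast [Int.toNat_natCast]; ring
  rw [hK]
  have hiK : i.toNat < (count.toNat / p.length + 1) * p.length := by
    have h1 := Nat.div_add_mod count.toNat p.length
    have h2 : count.toNat % p.length < p.length := Nat.mod_lt _ hl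
    have h3 : i.toNat < count.toNat := by omega
    nlinarith [h1, h2, h3]
  have hconv : ∀ (xs : List String), PySem.List.pyGetD xs i "" = xs.getD i.toNat "" := by
    intro xs
    have h := PySem.List.pyGetD_natCast (xs := xs) (n := i.toNat) (d := "")
    rwa [Int.toNat_of_nonneg hi] at h
  rw [hconv]
  rw [List.getD_eq_getElem?_getD, List.getElem?_take_of_lt (by omega), ← List.getD_eq_getElem?_getD]
  unfold PySem.List.pyRepeat
  rw [Int.toNat_natCast, pv_tile_getD p hp _ i.toNat hiK]

-- the column loop unfolds to a structural list of columns
def pvColsOf (opts : List String) (count : Int) : Int → List String → List (List String)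
  | _, [] => []
  | block, _ :: rest =>
      pvMkCol
          (pvRepeatEach
            (PySem.List.slice opts none
              (some (min (PySem.List.len opts) (PySem.Int.floordiv count block + 1))))
            (min block count)) count
        :: pvColsOf opts count (block * PySem.List.len opts) rest

theorem pv_colsLoop (opts : List String) (count : Int) :
    ∀ (fields : List String) (acc : List (List String)) (block : Int),
      (fields.foldl
        (fun (st : List (List String) × Int) _ =>
          (st.1 ++ [pvMkCol
              (pvRepeatEach
                (PySem.List.slice opts none
                  (some (min (PySem.List.len opts) (PySem.Int.floordiv count st.2 + 1))))
                (min st.2 count)) count],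
           st.2 * PySem.List.len opts))
        (acc, block)).1
      = acc ++ pvColsOf opts count block fields := by
  intro fields
  induction fields with
  | nil => intro acc block; simp [pvColsOf]
  | cons f rest ih =>
      intro acc block
      simp only [List.foldl_cons]
      rw [ih]
      simp [pvColsOf]

-- the per-row fold over zipped columns is the digit normal form
theorem pv_row_eq (opts : List String) (hopts : opts ≠ []) (count i : Int)
    (hi : 0 ≤ i) (hic : i < count) :
    ∀ (fields : List String) (j : Nat) (d : PySem.Dict String String),
      (List.zip fields ((pvColsOf opts count ((opts.length ^ j : Nat) : Int) fields).map
          (fun column => PySem.List.pyGetD column i ""))).foldl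
        (fun (d : PySem.Dict String String) kv => d.insert kv.1 kv.2) d
      = pvDigits opts (PySem.List.len opts) i j fields d := by
  have hl : 0 < opts.length := List.length_pos_of_ne_nil hopts
  intro fields
  induction fields with
  | nil => intro j d; rfl
  | cons f rest ih =>
      intro j d
      show (List.zip (f :: rest)
          ((pvMkCol
              (pvRepeatEach
                (PySem.List.slice opts none
                  (some (min (PySem.List.len opts)
                    (PySem.Int.floordiv count ((opts.length ^ j : Nat) : Int) + 1))))
                (min ((opts.length ^ j : Nat) : Int) count)) count
            :: pvColsOf opts count (((opts.length ^ j : Nat) : Int) * PySem.List.len opts) rest).map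
            (fun column => PySem.List.pyGetD column i ""))).foldl _ d = _
      have hstep : ((opts.length ^ j : Nat) : Int) * PySem.List.len opts
          = ((opts.length ^ (j + 1) : Nat) : Int) := by
        rw [PySem.List.len_eq]; push_cast; ring
      rw [hstep]
      simp only [List.map_cons, List.zip_cons_cons, List.foldl_cons]
      have hcnt0 : 0 < count.toNat := by omega
      have hitn : i.toNat < count.toNat := by omega
      set r : Nat := min (opts.length ^ j) count.toNat with hr
      set sp : Nat := min opts.length (count.toNat / opts.length ^ j + 1) with hsp
      have hmin : min ((opts.length ^ j : Nat) : Int) count = ((r : Nat) : Int) := by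
        rw [hr, Nat.cast_min, Int.toNat_of_nonneg (by omega : (0:Int) ≤ count)]
      have hfdc : PySem.Int.floordiv count ((opts.length ^ j : Nat) : Int)
          = ((count.toNat / opts.length ^ j : Nat) : Int) := by
        have h := PySem.Int.floordiv_natCast count.toNat (opts.length ^ j)
        rwa [Int.toNat_of_nonneg (by omega : (0:Int) ≤ count)] at h
      have hspan : min (PySem.List.len opts)
            (PySem.Int.floordiv count ((opts.length ^ j : Nat) : Int) + 1)
          = ((sp : Nat) : Int) := by
        rw [hfdc, PySem.List.len_eq, hsp, Nat.cast_min]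
        push_cast
        rfl
      have hsple : sp ≤ opts.length := by rw [hsp]; omega
      have hsppos : 0 < sp := by rw [hsp]; exact lt_min hl (Nat.succ_pos _)
      have hslice : PySem.List.slice opts none (some ((sp : Nat) : Int)) = opts.take sp := by
        rw [PySem.List.slice_to _ (by positivity), Int.toNat_natCast]
      have hrpos : 0 < r := by rw [hr]; exact lt_min (pow_pos hl j) hcnt0
      have htakeL : (opts.take sp).length = sp := by
        rw [List.length_take]; omega
      have hpatL : (pvRepeatEach (opts.take sp) ((r : Nat) : Int)).length = sp * r := by
        rw [pv_repeatEach_eq, pv_flatMap_replicate_length, htakeL]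
      have hpat : pvRepeatEach (opts.take sp) ((r : Nat) : Int) ≠ [] := by
        intro h
        have hz : (pvRepeatEach (opts.take sp) ((r : Nat) : Int)).length = 0 := by rw [h]; rfl
        rw [hpatL] at hz
        have := Nat.mul_pos hsppos hrpos
        omega
      rw [hmin, hspan, hslice, pv_mkCol_getD _ hpat count i hi hic]
      have hval : (pvRepeatEach (opts.take sp) ((r : Nat) : Int)).getD
            (i.toNat % (pvRepeatEach (opts.take sp) ((r : Nat) : Int)).length) ""
          = PySem.List.pyGetD opts
              (PySem.Int.mod (PySem.Int.floordiv i ((PySem.List.len opts) ^ j)) (PySem.List.len opts)) "" := by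
        have hfd : PySem.Int.floordiv i ((PySem.List.len opts) ^ j)
            = ((i.toNat / opts.length ^ j : Nat) : Int) := by
          have h := PySem.Int.floordiv_natCast i.toNat (opts.length ^ j)
          rw [Int.toNat_of_nonneg hi] at h
          rw [PySem.List.len_eq,
            show ((opts.length : Nat) : Int) ^ j = ((opts.length ^ j : Nat) : Int) by push_cast; ring]
          exact h
        rw [hfd, PySem.List.len_eq, PySem.Int.mod_natCast, PySem.List.pyGetD_natCast]
        rw [hpatL, pv_repeatEach_eq]
        rcases Nat.lt_or_ge (count.toNat) (opts.length ^ j) with hgt | hle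
        case inl =>
          -- capped run length: r = count, the digit is 0 on both sides
          have hrc : r = count.toNat := by rw [hr]; omega
          rw [hrc]
          have him : i.toNat % (sp * count.toNat) = i.toNat :=
            Nat.mod_eq_of_lt (by nlinarith [hsppos, hitn])
          rw [him, pv_flatMap_replicate_getD _ _ _
              (by rw [htakeL]; nlinarith [hsppos, hitn]),
            Nat.div_eq_of_lt hitn]
          rw [List.getD_eq_getElem?_getD, List.getElem?_take_of_lt hsppos,
            ← List.getD_eq_getElem?_getD,
            Nat.div_eq_of_lt (by omega), Nat.zero_mod]
        case inr =>
          rcases Nat.le_total opts.length (count.toNat / opts.length ^ j + 1) with hfull | hnw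
          · -- full span: sp = len(options), cyclic tiling, the modular chain
            have hspfull : sp = opts.length := by rw [hsp]; omega
            have hrj : r = opts.length ^ j := by rw [hr]; omega
            rw [hspfull, List.take_length, hrj,
              pv_flatMap_replicate_getD opts _ _ (Nat.mod_lt _ (Nat.mul_pos hl (pow_pos hl j))),
              Nat.mod_mul_left_div_self]
          · -- narrow span: sp = count / n^j + 1, no wrap-around occurs
            have hspn : sp = count.toNat / opts.length ^ j + 1 := by rw [hsp]; omega
            have hrj : r = opts.length ^ j := by rw [hr]; omega
            have hdivle : i.toNat / opts.length ^ j ≤ count.toNat / opts.length ^ j :=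
              Nat.div_le_div_right (le_of_lt hitn)
            have hnowrap : i.toNat < sp * r := by
              rw [hspn, hrj]
              have h1 := Nat.div_add_mod count.toNat (opts.length ^ j)
              have h2 : count.toNat % opts.length ^ j < opts.length ^ j :=
                Nat.mod_lt _ (pow_pos hl j)
              nlinarith
            rw [Nat.mod_eq_of_lt hnowrap,
              pv_flatMap_replicate_getD _ _ _ (by rw [htakeL]; exact hnowrap),
              hrj]
            rw [List.getD_eq_getElem?_getD,
              List.getElem?_take_of_lt (by omega),
              ← List.getD_eq_getElem?_getD,
              Nat.mod_eq_of_lt (by omega)]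
      rw [hval]
      exact ih (j + 1) _

-- ===== VERDICT (by name: the statement is the Claim_ definition above) =====
theorem generate_item_metadata_spec : Claim_equal_generate_item_metadata := by
  intro metadata_fields metadata_options num_items hdom hpre
  show generate_item_metadata metadata_fields metadata_options num_items
      = generate_item_metadata_alt metadata_fields metadata_options num_items
  by_cases hneg : num_items ≤ 0
  · simp [generate_item_metadata, generate_item_metadata_alt,
      PySem.List.pyRange_one_eq_nil hneg, show max num_items 0 = 0 by omega]
  · obtain ⟨k, rfl⟩ : ∃ k : Nat, num_items = (k : Int) :=
      ⟨num_items.toNat, (Int.toNat_of_nonneg (by omega)).symm⟩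
    have hmax : max ((k : Int)) 0 = (k : Int) := by omega
    have hk0 : ¬ ((k : Int) = 0) := by omega
    by_cases hfe : metadata_fields = []
    · -- empty fields: A writes nothing into each dict; B returns count empty rows
      subst hfe
      have H := pv_outer (fun _ => PySem.Dict.empty)
        (fun d i => (pvAInner metadata_options [] (d, i)).1)
        (fun i _ => rfl) k []
      simp only [List.append_nil] at H
      simp only [generate_item_metadata, generate_item_metadata_alt, hmax]
      rw [if_pos trivial, H, List.map_map, if_neg hk0]
      rfl
    · -- main case: nonempty options (from Pre_), positive count, nonempty fields
      have hopts : metadata_options ≠ [] := by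
        rcases hpre with h | h | h
        · exact h
        · exact absurd h hfe
        · omega
      have hn : 0 < PySem.List.len metadata_options := by
        have := List.length_pos_of_ne_nil hopts
        rw [PySem.List.len_eq]; omega
      have H := pv_outer
        (fun i => pvDigits metadata_options (PySem.List.len metadata_options) i 0 metadata_fields
          PySem.Dict.empty)
        (fun d i => (pvAInner metadata_options metadata_fields (d, i)).1)
        (fun i hi => pv_hfg metadata_fields metadata_options hn i hi) k []
      simp only [List.append_nil] at H
      simp only [generate_item_metadata, generate_item_metadata_alt, hmax]
      rw [if_neg hk0, if_neg hfe]
      rw [H, List.map_map]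
      rw [pv_colsLoop metadata_options (k : Int) metadata_fields [] 1,
          List.nil_append]
      apply List.map_congr_left
      intro i hi
      rw [PySem.List.mem_pyRange_one] at hi
      simp only [Function.comp]
      congr 1
      have h1 := pv_row_eq metadata_options hopts (k : Int) i hi.1 hi.2 metadata_fields 0
        PySem.Dict.empty
      rw [show ((metadata_options.length ^ 0 : Nat) : Int) = 1 by simp] at h1
      exact h1.symm
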